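-- pv_equiv track=rewrite | github.com/thomason-jesse/YCBLanguage | scripts/utils.py | make_lang_structures
-- ===== SOURCE A (Python) =====
-- def make_lang_structures(tr_f, te_f, inc_test=False):
--     word_to_i = {"<?>": 0, "<s>": 1, "<e>": 2, "<_>": 4}
--     i_to_word = {0: "<?>", 1: "<s>", 2: "<e>", 3: "<_>"}
--     maxlen = 0
--     tr_enc_exps = []
--     for idx in range(len(tr_f)):
--         pair_re_is = []
--         for oidx in range(2):
--             ob_re_is = []
--             for re in tr_f[idx][oidx]:
--                 re_is = [word_to_i["<s>"]]
--                 for w in re: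
--                     if w not in word_to_i:
--                         i = len(i_to_word)
--                         word_to_i[w] = i
--                         i_to_word[i] = w
--                     re_is.append(word_to_i[w])
--                 re_is.append(word_to_i["<e>"])
--                 maxlen = max(maxlen, len(re_is))
--                 ob_re_is.append(re_is)
--             pair_re_is.append(ob_re_is)
--         tr_enc_exps.append(pair_re_is)
--
--     te_enc_exps = []
--     for idx in range(len(te_f)):
--         pair_re_is = []
--         for oidx in range(2):
--             ob_re_is = []
--             for re in te_f[idx][oidx]:
--                 re_is = [word_to_i["<s>"]]
--                 for w in re:
--                     if w not in word_to_i: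
--                         if inc_test:
--                             i = len(i_to_word)
--                             word_to_i[w] = i
--                             i_to_word[i] = w
--                         else:
--                             i = word_to_i["<?>"]
--                     else:
--                         i = word_to_i[w]
--                     re_is.append(i)
--                 re_is.append(word_to_i["<e>"])
--                 maxlen = max(maxlen, len(re_is))
--                 ob_re_is.append(re_is)
--             pair_re_is.append(ob_re_is)
--         te_enc_exps.append(pair_re_is)
--
--     return word_to_i, i_to_word, maxlen, tr_enc_exps, te_enc_exps
-- ===== SOURCE B (Python) =====
-- def make_lang_structures(tr_f, te_f, inc_test=False):
--     word_to_i = {"<?>": 0, "<s>": 1, "<e>": 2, "<_>": 4}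
--     i_to_word = {0: "<?>", 1: "<s>", 2: "<e>", 3: "<_>"}
--
--     # pass 1: build the vocabulary only, visiting words in the original order
--     for fold in ((tr_f, te_f) if inc_test else (tr_f,)):
--         for pair in fold:
--             for ob in (pair[0], pair[1]):
--                 for re in ob:
--                     for w in re:
--                         if w not in word_to_i:
--                             i = len(i_to_word)
--                             word_to_i[w] = i
--                             i_to_word[i] = w
--
--     # pass 2: pure encoding against the finished vocabulary
--     unk = word_to_i["<?>"]
--     s_i, e_i = word_to_i["<s>"], word_to_i["<e>"]
--
--     def encode(re):
--         return [s_i] + [word_to_i.get(w, unk) for w in re] + [e_i]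
--
--     tr_enc_exps = [[[encode(re) for re in pair[oidx]] for oidx in (0, 1)] for pair in tr_f]
--     te_enc_exps = [[[encode(re) for re in pair[oidx]] for oidx in (0, 1)] for pair in te_f]
--     maxlen = max([0] + [len(e) for p in tr_enc_exps + te_enc_exps for ob in p for e in ob])
--     return word_to_i, i_to_word, maxlen, tr_enc_exps, te_enc_exps
-- ===== Notes on version B (the rewrite author's own statement) =====
-- stated objective: alternative
-- what changed: A builds the vocabulary, the encodings and maxlen in one interleaved stateful sweep; B is decomposed into a vocabulary-building pass over the word stream (train, plus test when inc_test) followed by a pure encoding pass against the finished vocabulary, with maxlen computed once over all encodings.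
import Mathlib
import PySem

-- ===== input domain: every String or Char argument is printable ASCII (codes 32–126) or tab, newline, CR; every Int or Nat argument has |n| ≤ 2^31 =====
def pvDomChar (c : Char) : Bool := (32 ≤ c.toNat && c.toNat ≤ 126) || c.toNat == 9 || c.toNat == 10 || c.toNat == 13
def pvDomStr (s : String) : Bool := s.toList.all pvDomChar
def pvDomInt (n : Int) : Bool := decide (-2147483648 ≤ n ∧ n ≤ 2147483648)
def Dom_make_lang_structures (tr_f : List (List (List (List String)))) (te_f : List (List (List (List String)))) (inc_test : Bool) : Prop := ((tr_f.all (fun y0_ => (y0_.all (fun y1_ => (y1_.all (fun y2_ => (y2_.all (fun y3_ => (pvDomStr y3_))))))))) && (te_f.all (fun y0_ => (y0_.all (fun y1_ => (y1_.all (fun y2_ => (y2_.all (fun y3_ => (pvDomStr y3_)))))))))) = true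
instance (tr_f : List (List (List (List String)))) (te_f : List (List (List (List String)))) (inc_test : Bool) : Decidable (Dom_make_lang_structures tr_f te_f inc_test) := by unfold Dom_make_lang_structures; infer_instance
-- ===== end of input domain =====

-- B splits A's single stateful sweep into a vocabulary-building pass and a pure encoding pass (same values; objective: alternative decomposition).

-- ===== PORT A =====
-- A-side helpers: the vocab state is (word_to_i, i_to_word); A threads it through every loop.
abbrev PVVocab := PySem.Dict String Int × PySem.Dict Int String

def pvAInitW2I : PySem.Dict String Int :=
  PySem.Dict.ofList [("<?>", 0), ("<s>", 1), ("<e>", 2), ("<_>", 4)]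
def pvAInitI2W : PySem.Dict Int String :=
  PySem.Dict.ofList [(0, "<?>"), (1, "<s>"), (2, "<e>"), (3, "<_>")]

-- body of 'if w not in word_to_i: i = len(i_to_word); word_to_i[w] = i; i_to_word[i] = w' (train loop)
def pvAWordTr (d : PVVocab) (w : String) : PVVocab :=
  if (d.1.get? w).isSome then d
  else
    let i : Int := (d.2.size : Int)
    (d.1.insert w i, d.2.insert i w)

-- 're_is = [word_to_i["<s>"]]; for w in re: …; re_is.append(word_to_i["<e>"])' (train loop)
def pvATrRe (d : PVVocab) (re : List String) : PVVocab × List Int :=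
  let r := re.foldl (fun acc w =>
      let d' := pvAWordTr acc.1 w
      (d', acc.2 ++ [d'.1.getD w 0]))
    (d, [d.1.getD "<s>" 0])
  (r.1, r.2 ++ [r.1.1.getD "<e>" 0])

-- 'for re in tr_f[idx][oidx]: …; maxlen = max(maxlen, len(re_is)); ob_re_is.append(re_is)'
def pvATrOb (st : PVVocab × Int) (ob : List (List String)) (acc : List (List Int)) :
    (PVVocab × Int) × List (List Int) :=
  ob.foldl (fun a re =>
      let r := pvATrRe a.1.1 re
      ((r.1, max a.1.2 ((r.2.length : Int))), a.2 ++ [r.2]))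
    (st, acc)

-- 'for oidx in range(2)'; 'tr_f[idx][oidx]' raises IndexError when the pair is shorter
-- (excluded by Pre_); '.getD []' only totalises the port there.
def pvATrPair (st : PVVocab × Int) (pair : List (List (List String))) :
    (PVVocab × Int) × List (List (List Int)) :=
  (([0, 1] : List Int).foldl (fun a oidx =>
      let r := pvATrOb a.1 ((PySem.List.pyGet? pair oidx).getD []) []
      (r.1, a.2 ++ [r.2]))
    (st, []))

-- 'for idx in range(len(tr_f)): …; tr_enc_exps.append(pair_re_is)'
def pvATrAll (st : PVVocab × Int) (trs : List (List (List (List String)))) :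
    (PVVocab × Int) × List (List (List (List Int))) :=
  trs.foldl (fun a p =>
      let r := pvATrPair a.1 p
      (r.1, a.2 ++ [r.2]))
    (st, [])

-- test-loop word body: looked up if present, else added (inc_test) or encoded as <?>
def pvATeWord (inc : Bool) (d : PVVocab) (w : String) : PVVocab × Int :=
  if (d.1.get? w).isSome then (d, d.1.getD w 0)
  else if inc then
    let i : Int := (d.2.size : Int)
    ((d.1.insert w i, d.2.insert i w), i)
  else (d, d.1.getD "<?>" 0)

def pvATeRe (inc : Bool) (d : PVVocab) (re : List String) : PVVocab × List Int :=
  let r := re.foldl (fun acc w =>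
      let s := pvATeWord inc acc.1 w
      (s.1, acc.2 ++ [s.2]))
    (d, [d.1.getD "<s>" 0])
  (r.1, r.2 ++ [r.1.1.getD "<e>" 0])

def pvATeOb (inc : Bool) (st : PVVocab × Int) (ob : List (List String)) (acc : List (List Int)) :
    (PVVocab × Int) × List (List Int) :=
  ob.foldl (fun a re =>
      let r := pvATeRe inc a.1.1 re
      ((r.1, max a.1.2 ((r.2.length : Int))), a.2 ++ [r.2]))
    (st, acc)

def pvATePair (inc : Bool) (st : PVVocab × Int) (pair : List (List (List String))) :
    (PVVocab × Int) × List (List (List Int)) :=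
  (([0, 1] : List Int).foldl (fun a oidx =>
      let r := pvATeOb inc a.1 ((PySem.List.pyGet? pair oidx).getD []) []
      (r.1, a.2 ++ [r.2]))
    (st, []))

def pvATeAll (inc : Bool) (st : PVVocab × Int) (tes : List (List (List (List String)))) :
    (PVVocab × Int) × List (List (List (List Int))) :=
  tes.foldl (fun a p =>
      let r := pvATePair inc a.1 p
      (r.1, a.2 ++ [r.2]))
    (st, [])

def make_lang_structures (tr_f : List (List (List (List String)))) (te_f : List (List (List (List String)))) (inc_test : Bool) : (List (String × Int)) × (List (Int × String)) × Int × List (List (List (List Int))) × List (List (List (List Int))) :=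
  let tr_r := pvATrAll ((pvAInitW2I, pvAInitI2W), 0) tr_f
  let te_r := pvATeAll inc_test tr_r.1 te_f
  (te_r.1.1.1.items, te_r.1.1.2.items, te_r.1.2, tr_r.2, te_r.2)

-- ===== PORT B =====
-- B-side helpers: pass 1 folds 'add_word' over the word stream; pass 2 encodes purely.
def pvBInitW2I : PySem.Dict String Int :=
  PySem.Dict.ofList [("<?>", 0), ("<s>", 1), ("<e>", 2), ("<_>", 4)]
def pvBInitI2W : PySem.Dict Int String :=
  PySem.Dict.ofList [(0, "<?>"), (1, "<s>"), (2, "<e>"), (3, "<_>")]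

def pvBAdd (d : PVVocab) (w : String) : PVVocab :=
  if d.1.contains w then d
  else
    let i : Int := (d.2.size : Int)
    (d.1.insert w i, d.2.insert i w)

-- the words of one pair, in visiting order ('pair[0]', 'pair[1]' raise when too short; Pre_)
def pvBPairWords (p : List (List (List String))) : List String :=
  (((PySem.List.pyGet? p 0).getD []) ++ ((PySem.List.pyGet? p 1).getD [])).flatten

def pvBWords (f : List (List (List (List String)))) : List String :=
  (f.map pvBPairWords).flatten

def pvBVocab (tr_f te_f : List (List (List (List String)))) (inc : Bool) : PVVocab :=
  ((pvBWords tr_f) ++ (if inc then pvBWords te_f else [])).foldl pvBAdd (pvBInitW2I, pvBInitI2W)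

def pvBEncode (d : PySem.Dict String Int) (si ei unk : Int) (re : List String) : List Int :=
  [si] ++ re.map (fun w => d.getD w unk) ++ [ei]

def pvBEncFold (d : PySem.Dict String Int) (si ei unk : Int)
    (f : List (List (List (List String)))) : List (List (List (List Int))) :=
  f.map (fun p => ([0, 1] : List Int).map (fun oidx =>
    ((PySem.List.pyGet? p oidx).getD []).map (pvBEncode d si ei unk)))

def make_lang_structures_alt (tr_f : List (List (List (List String)))) (te_f : List (List (List (List String)))) (inc_test : Bool) : (List (String × Int)) × (List (Int × String)) × Int × List (List (List (List Int))) × List (List (List (List Int))) :=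
  let v := pvBVocab tr_f te_f inc_test
  let unk := v.1.getD "<?>" 0
  let si := v.1.getD "<s>" 0
  let ei := v.1.getD "<e>" 0
  let trE := pvBEncFold v.1 si ei unk tr_f
  let teE := pvBEncFold v.1 si ei unk te_f
  let maxlen := ((trE ++ teE).flatten.flatten).foldl (fun m e => max m ((e.length : Int))) 0
  (v.1.items, v.2.items, maxlen, trE, teE)

-- ===== PRECONDITION & SPEC =====
-- Pre_ excludes pairs with fewer than two elements, on which Python A raises IndexError at tr_f[idx][oidx].
def Pre_make_lang_structures (tr_f : List (List (List (List String)))) (te_f : List (List (List (List String)))) (inc_test : Bool) : Prop :=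
  (∀ p ∈ tr_f, 2 ≤ p.length) ∧ (∀ p ∈ te_f, 2 ≤ p.length)
instance (tr_f : List (List (List (List String)))) (te_f : List (List (List (List String)))) (inc_test : Bool) : Decidable (Pre_make_lang_structures tr_f te_f inc_test) := by unfold Pre_make_lang_structures; infer_instance

def pvWitness_make_lang_structures : List (List (List (List String))) × List (List (List (List String))) × Bool :=
  ([[[["a", "b"], ["a"]], [[]]]], [[[["c"]], [["a", "c"]]]], false)

def Spec_make_lang_structures (tr_f : List (List (List (List String)))) (te_f : List (List (List (List String)))) (inc_test : Bool) (out : (List (String × Int)) × (List (Int × String)) × Int × List (List (List (List Int))) × List (List (List (List Int)))) : Prop := out = make_lang_structures_alt tr_f te_f inc_test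
instance (tr_f : List (List (List (List String)))) (te_f : List (List (List (List String)))) (inc_test : Bool) (out : (List (String × Int)) × (List (Int × String)) × Int × List (List (List (List Int))) × List (List (List (List Int)))) : Decidable (Spec_make_lang_structures tr_f te_f inc_test out) := by
  unfold Spec_make_lang_structures
  exact @instDecidableEqProd _ _ _ (@instDecidableEqProd _ _ _ (@instDecidableEqProd _ _ _ (@instDecidableEqProd _ _ _ _))) _ _

-- ===== CLAIM (what is proved, stated in full; the proofs are below) =====
def Claim_equal_make_lang_structures : Prop := ∀ (tr_f : List (List (List (List String)))) (te_f : List (List (List (List String)))) (inc_test : Bool), Dom_make_lang_structures tr_f te_f inc_test → Pre_make_lang_structures tr_f te_f inc_test → Spec_make_lang_structures tr_f te_f inc_test (make_lang_structures tr_f te_f inc_test)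

-- ===== LEMMAS AND PROOFS =====

-- `d` extends to `D`: every binding of d's word_to_i survives (vocab inserts never overwrite)
def PVExt (d D : PySem.Dict String Int) : Prop :=
  ∀ w v, d.get? w = some v → D.get? w = some v

theorem pvExt_refl (d : PySem.Dict String Int) : PVExt d d := fun _ _ h => h

theorem pvExt_trans {a b c : PySem.Dict String Int} (h1 : PVExt a b) (h2 : PVExt b c) :
    PVExt a c := fun w v h => h2 w v (h1 w v h)

theorem pvAdd_eq (d : PVVocab) (w : String) : pvAWordTr d w = pvBAdd d w := by
  unfold pvAWordTr pvBAdd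
  rw [PySem.Dict.contains_eq_isSome_get?]

theorem pvAdd_ext (d : PVVocab) (w : String) : PVExt d.1 (pvBAdd d w).1 := by
  intro w' v h
  unfold pvBAdd
  by_cases hc : d.1.contains w
  · simpa [hc] using h
  · have hne : w' ≠ w := by
      intro he
      rw [he] at h
      rw [PySem.Dict.contains_eq_isSome_get?, h] at hc
      simp at hc
    simpa [hc, PySem.Dict.get?_insert_of_ne _ _ hne] using h

theorem pvFold_ext (ws : List String) (d : PVVocab) : PVExt d.1 ((ws.foldl pvBAdd d)).1 := by
  induction ws generalizing d with
  | nil => exact pvExt_refl _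
  | cons w ws ih => exact pvExt_trans (pvAdd_ext d w) (ih (pvBAdd d w))

theorem pvAdd_self (d : PVVocab) (w : String) : ((pvBAdd d w).1.get? w).isSome := by
  unfold pvBAdd
  by_cases hc : d.1.contains w
  · simpa [hc] using (by rw [← PySem.Dict.contains_eq_isSome_get?]; exact hc)
  · simp [hc, PySem.Dict.get?_insert_self]

theorem pvTrWords (re : List String) (d : PVVocab) (acc : List Int) (D : PVVocab)
    (hD : PVExt (re.foldl pvBAdd d).1 D.1) (unk : Int) :
    re.foldl (fun a w => ((pvAWordTr a.1 w), a.2 ++ [(pvAWordTr a.1 w).1.getD w 0])) (d, acc)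
      = (re.foldl pvBAdd d, acc ++ re.map (fun w => D.1.getD w unk)) := by
  induction re generalizing d acc with
  | nil => simp
  | cons w ws ih =>
    simp only [List.foldl_cons, List.map_cons] at hD ⊢
    obtain ⟨v, hv⟩ := Option.isSome_iff_exists.mp (pvAdd_self d w)
    have hDv : D.1.get? w = some v := hD w v (pvFold_ext ws (pvBAdd d w) w v hv)
    have hstep : ((pvAWordTr d w), acc ++ [(pvAWordTr d w).1.getD w 0])
        = (pvBAdd d w, acc ++ [v]) := by
      rw [pvAdd_eq, PySem.Dict.getD_of_get?_eq_some _ _ hv]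
    rw [hstep, ih (pvBAdd d w) (acc ++ [v]) hD, PySem.Dict.getD_of_get?_eq_some _ _ hDv]
    simp

theorem pvInit_s : pvAInitW2I.get? "<s>" = some 1 := by decide
theorem pvInit_e : pvAInitW2I.get? "<e>" = some 2 := by decide
theorem pvInit_q : pvAInitW2I.get? "<?>" = some 0 := by decide

theorem pvTrRe_eq (re : List String) (d D : PVVocab)
    (h0 : PVExt pvAInitW2I d.1) (hD : PVExt (re.foldl pvBAdd d).1 D.1) :
    pvATrRe d re = (re.foldl pvBAdd d, pvBEncode D.1 1 2 0 re) := by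
  have h0f : PVExt pvAInitW2I (re.foldl pvBAdd d).1 := pvExt_trans h0 (pvFold_ext re d)
  have hs : d.1.getD "<s>" 0 = 1 := PySem.Dict.getD_of_get?_eq_some _ _ (h0 _ _ pvInit_s)
  have he : (re.foldl pvBAdd d).1.getD "<e>" 0 = 2 :=
    PySem.Dict.getD_of_get?_eq_some _ _ (h0f _ _ pvInit_e)
  have hw := pvTrWords re d [1] D hD 0
  unfold pvATrRe
  simp only [hs, hw]
  simp [pvBEncode, he]

theorem pvBEncode_len (d : PySem.Dict String Int) (si ei unk : Int) (re : List String) :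
    ((pvBEncode d si ei unk re).length : Int) = (re.length : Int) + 2 := by
  simp [pvBEncode]
  omega

-- running 'maxlen = max(maxlen, len(re_is))' over a list of referring expressions
def pvMLen (m : Int) (res : List (List String)) : Int :=
  res.foldl (fun m re => max m ((re.length : Int) + 2)) m

theorem pvTrOb_eq (ob : List (List String)) (st : PVVocab × Int) (acc : List (List Int))
    (D : PVVocab) (h0 : PVExt pvAInitW2I st.1.1)
    (hD : PVExt ((ob.flatten).foldl pvBAdd st.1).1 D.1) :
    pvATrOb st ob acc
      = (((ob.flatten).foldl pvBAdd st.1, pvMLen st.2 ob), acc ++ ob.map (pvBEncode D.1 1 2 0)) := by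
  induction ob generalizing st acc with
  | nil => simp [pvATrOb, pvMLen]
  | cons re obs ih =>
    have hsplit : (re :: obs).flatten.foldl pvBAdd st.1
        = obs.flatten.foldl pvBAdd (re.foldl pvBAdd st.1) := by
      simp [List.foldl_append]
    rw [hsplit] at hD
    have hD1 : PVExt (re.foldl pvBAdd st.1).1 D.1 :=
      pvExt_trans (pvFold_ext obs.flatten (re.foldl pvBAdd st.1)) hD
    have hre := pvTrRe_eq re st.1 D h0 hD1
    have hihx := ih ((re.foldl pvBAdd st.1), max st.2 ((re.length : Int) + 2))
        (acc ++ [pvBEncode D.1 1 2 0 re]) (pvExt_trans h0 (pvFold_ext re st.1)) hD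
    unfold pvATrOb at hihx ⊢
    simp only [List.foldl_cons, hre, pvBEncode_len]
    rw [hihx, hsplit]
    simp [pvMLen]

-- the referring expressions of one pair, in visiting order
def pvPairEnc (d : PySem.Dict String Int) (p : List (List (List String))) :
    List (List (List Int)) :=
  [((PySem.List.pyGet? p 0).getD []).map (pvBEncode d 1 2 0),
   ((PySem.List.pyGet? p 1).getD []).map (pvBEncode d 1 2 0)]

def pvPairRes (p : List (List (List String))) : List (List String) :=
  ((PySem.List.pyGet? p 0).getD []) ++ ((PySem.List.pyGet? p 1).getD [])

theorem pvTrPair_eq (p : List (List (List String))) (st : PVVocab × Int) (D : PVVocab)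
    (h0 : PVExt pvAInitW2I st.1.1)
    (hD : PVExt ((pvBPairWords p).foldl pvBAdd st.1).1 D.1) :
    pvATrPair st p
      = (((pvBPairWords p).foldl pvBAdd st.1, pvMLen st.2 (pvPairRes p)),
         pvPairEnc D.1 p) := by
  have hW : (pvBPairWords p).foldl pvBAdd st.1
      = (((PySem.List.pyGet? p 1).getD []).flatten).foldl pvBAdd
          ((((PySem.List.pyGet? p 0).getD []).flatten).foldl pvBAdd st.1) := by
    simp [pvBPairWords, List.foldl_append]
  rw [hW] at hD
  have hD0 : PVExt ((((PySem.List.pyGet? p 0).getD []).flatten).foldl pvBAdd st.1).1 D.1 :=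
    pvExt_trans (pvFold_ext _ _) hD
  unfold pvATrPair
  simp only [List.foldl_cons, List.foldl_nil]
  rw [pvTrOb_eq _ _ _ D h0 hD0]
  rw [pvTrOb_eq _ _ _ D (pvExt_trans h0 (pvFold_ext _ _)) hD]
  rw [hW]
  simp [pvPairRes, pvPairEnc, pvMLen, List.foldl_append]

theorem pvBWords_cons (p : List (List (List String))) (ps : List (List (List (List String)))) :
    pvBWords (p :: ps) = pvBPairWords p ++ pvBWords ps := by
  simp [pvBWords]

-- running maxlen over a whole fold (list of pairs)
def pvMLenAll (m : Int) (f : List (List (List (List String)))) : Int :=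
  f.foldl (fun m p => pvMLen m (pvPairRes p)) m

theorem pvTrFold_eq (f : List (List (List (List String)))) (st : PVVocab × Int)
    (acc : List (List (List (List Int)))) (D : PVVocab)
    (h0 : PVExt pvAInitW2I st.1.1)
    (hD : PVExt ((pvBWords f).foldl pvBAdd st.1).1 D.1) :
    f.foldl (fun a p => ((pvATrPair a.1 p).1, a.2 ++ [(pvATrPair a.1 p).2])) (st, acc)
      = (((pvBWords f).foldl pvBAdd st.1, pvMLenAll st.2 f), acc ++ f.map (pvPairEnc D.1)) := by
  induction f generalizing st acc with
  | nil => simp [pvBWords, pvMLenAll]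
  | cons p ps ih =>
    have hsplit : (pvBWords (p :: ps)).foldl pvBAdd st.1
        = (pvBWords ps).foldl pvBAdd ((pvBPairWords p).foldl pvBAdd st.1) := by
      rw [pvBWords_cons, List.foldl_append]
    rw [hsplit] at hD
    have hD1 : PVExt ((pvBPairWords p).foldl pvBAdd st.1).1 D.1 :=
      pvExt_trans (pvFold_ext _ _) hD
    simp only [List.foldl_cons, pvTrPair_eq p st D h0 hD1]
    rw [ih ((pvBPairWords p).foldl pvBAdd st.1, pvMLen st.2 (pvPairRes p))
        (acc ++ [pvPairEnc D.1 p]) (pvExt_trans h0 (pvFold_ext _ _)) hD]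
    rw [hsplit]
    simp [pvMLenAll, pvPairEnc]

theorem pvTrAll_eq (f : List (List (List (List String)))) (st : PVVocab × Int) (D : PVVocab)
    (h0 : PVExt pvAInitW2I st.1.1)
    (hD : PVExt ((pvBWords f).foldl pvBAdd st.1).1 D.1) :
    pvATrAll st f
      = (((pvBWords f).foldl pvBAdd st.1, pvMLenAll st.2 f), f.map (pvPairEnc D.1)) := by
  have h := pvTrFold_eq f st [] D h0 hD
  simpa [pvATrAll] using h

-- the test loop with inc_test=True is the train loop
theorem pvATeWord_true (d : PVVocab) (w : String) :
    pvATeWord true d w = (pvAWordTr d w, (pvAWordTr d w).1.getD w 0) := by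
  unfold pvATeWord pvAWordTr
  by_cases h : (d.1.get? w).isSome
  · simp [h]
  · simp [h, PySem.Dict.getD_insert_self]

theorem pvATeRe_true (d : PVVocab) (re : List String) : pvATeRe true d re = pvATrRe d re := by
  unfold pvATeRe pvATrRe
  have hfn : (fun (a : PVVocab × List Int) w =>
      ((pvATeWord true a.1 w).1, a.2 ++ [(pvATeWord true a.1 w).2]))
      = (fun (a : PVVocab × List Int) w =>
      ((pvAWordTr a.1 w), a.2 ++ [(pvAWordTr a.1 w).1.getD w 0])) := by
    funext a w
    simp [pvATeWord_true]
  simp only [hfn]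

theorem pvATeOb_true (st : PVVocab × Int) (ob : List (List String)) (acc : List (List Int)) :
    pvATeOb true st ob acc = pvATrOb st ob acc := by
  unfold pvATeOb pvATrOb
  have hfn : (fun (a : (PVVocab × Int) × List (List Int)) re =>
      (((pvATeRe true a.1.1 re).1, max a.1.2 (((pvATeRe true a.1.1 re).2.length : Int))),
        a.2 ++ [(pvATeRe true a.1.1 re).2]))
      = (fun (a : (PVVocab × Int) × List (List Int)) re =>
      (((pvATrRe a.1.1 re).1, max a.1.2 (((pvATrRe a.1.1 re).2.length : Int))),
        a.2 ++ [(pvATrRe a.1.1 re).2])) := by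
    funext a re
    simp [pvATeRe_true]
  simp only [hfn]

theorem pvATePair_true (st : PVVocab × Int) (p : List (List (List String))) :
    pvATePair true st p = pvATrPair st p := by
  unfold pvATePair pvATrPair
  simp only [List.foldl_cons, List.foldl_nil, pvATeOb_true]

theorem pvATeAll_true (st : PVVocab × Int) (tes : List (List (List (List String)))) :
    pvATeAll true st tes = pvATrAll st tes := by
  unfold pvATeAll pvATrAll
  have hfn : (fun (a : (PVVocab × Int) × List (List (List (List Int)))) p =>
      ((pvATePair true a.1 p).1, a.2 ++ [(pvATePair true a.1 p).2]))
      = (fun (a : (PVVocab × Int) × List (List (List (List Int)))) p =>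
      ((pvATrPair a.1 p).1, a.2 ++ [(pvATrPair a.1 p).2])) := by
    funext a p
    simp [pvATePair_true]
  simp only [hfn]

-- the test loop with inc_test=False never changes the vocab
theorem pvATeWord_false (d : PVVocab) (w : String) (h0 : PVExt pvAInitW2I d.1) :
    pvATeWord false d w = (d, d.1.getD w 0) := by
  unfold pvATeWord
  by_cases h : (d.1.get? w).isSome
  · simp [h]
  · have hn : d.1.get? w = none := by
      cases hh : d.1.get? w
      · rfl
      · rw [hh] at h; simp at h
    rw [PySem.Dict.getD_of_get?_eq_none _ _ hn]
    have hq : d.1.getD "<?>" 0 = 0 := PySem.Dict.getD_of_get?_eq_some _ _ (h0 _ _ pvInit_q)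
    simp [h, hq]

theorem pvTeWordsF (re : List String) (d : PVVocab) (acc : List Int)
    (h0 : PVExt pvAInitW2I d.1) :
    re.foldl (fun a w => ((pvATeWord false a.1 w).1, a.2 ++ [(pvATeWord false a.1 w).2])) (d, acc)
      = (d, acc ++ re.map (fun w => d.1.getD w 0)) := by
  induction re generalizing acc with
  | nil => simp
  | cons w ws ih =>
    simp only [List.foldl_cons, List.map_cons, pvATeWord_false d w h0]
    rw [ih (acc ++ [d.1.getD w 0])]
    simp

theorem pvATeRe_false (d : PVVocab) (re : List String) (h0 : PVExt pvAInitW2I d.1) :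
    pvATeRe false d re = (d, pvBEncode d.1 1 2 0 re) := by
  have hs : d.1.getD "<s>" 0 = 1 := PySem.Dict.getD_of_get?_eq_some _ _ (h0 _ _ pvInit_s)
  have he : d.1.getD "<e>" 0 = 2 := PySem.Dict.getD_of_get?_eq_some _ _ (h0 _ _ pvInit_e)
  have hw := pvTeWordsF re d [1] h0
  unfold pvATeRe
  simp only [hs, hw]
  simp [pvBEncode, he]

theorem pvATeOb_false (d : PVVocab) (m : Int) (ob : List (List String)) (acc : List (List Int))
    (h0 : PVExt pvAInitW2I d.1) :
    pvATeOb false (d, m) ob acc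
      = ((d, pvMLen m ob), acc ++ ob.map (pvBEncode d.1 1 2 0)) := by
  induction ob generalizing m acc with
  | nil => simp [pvATeOb, pvMLen]
  | cons re obs ih =>
    have hihx := ih (max m ((re.length : Int) + 2)) (acc ++ [pvBEncode d.1 1 2 0 re])
    unfold pvATeOb at hihx ⊢
    simp only [List.foldl_cons, pvATeRe_false d re h0, pvBEncode_len]
    rw [hihx]
    simp [pvMLen]

theorem pvATePair_false (d : PVVocab) (m : Int) (p : List (List (List String)))
    (h0 : PVExt pvAInitW2I d.1) :
    pvATePair false (d, m) p = ((d, pvMLen m (pvPairRes p)), pvPairEnc d.1 p) := by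
  unfold pvATePair
  simp only [List.foldl_cons, List.foldl_nil]
  rw [pvATeOb_false d m _ _ h0, pvATeOb_false d _ _ _ h0]
  simp [pvPairRes, pvPairEnc, pvMLen, List.foldl_append]

theorem pvTeFoldF (f : List (List (List (List String)))) (d : PVVocab) (m : Int)
    (acc : List (List (List (List Int)))) (h0 : PVExt pvAInitW2I d.1) :
    f.foldl (fun a p => ((pvATePair false a.1 p).1, a.2 ++ [(pvATePair false a.1 p).2])) ((d, m), acc)
      = ((d, pvMLenAll m f), acc ++ f.map (pvPairEnc d.1)) := by
  induction f generalizing m acc with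
  | nil => simp [pvMLenAll]
  | cons p ps ih =>
    simp only [List.foldl_cons, pvATePair_false d m p h0]
    rw [ih (pvMLen m (pvPairRes p)) (acc ++ [pvPairEnc d.1 p])]
    simp [pvMLenAll]

theorem pvATeAll_false (d : PVVocab) (m : Int) (tes : List (List (List (List String))))
    (h0 : PVExt pvAInitW2I d.1) :
    pvATeAll false (d, m) tes = ((d, pvMLenAll m tes), tes.map (pvPairEnc d.1)) := by
  have h := pvTeFoldF tes d m [] h0
  simpa [pvATeAll] using h

-- B's encoding table has A's per-pair shape
theorem pvBEncFold_eq (d : PySem.Dict String Int) (f : List (List (List (List String)))) :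
    pvBEncFold d 1 2 0 f = f.map (pvPairEnc d) := by
  unfold pvBEncFold pvPairEnc
  simp [List.map_cons]

-- B's single maxlen fold over all encodings equals A's threaded maxlen
theorem pvBMaxOb (d : PySem.Dict String Int) (ob : List (List String)) (m : Int) :
    (ob.map (pvBEncode d 1 2 0)).foldl (fun m e => max m ((e.length : Int))) m = pvMLen m ob := by
  induction ob generalizing m with
  | nil => simp [pvMLen]
  | cons re obs ih =>
    simp only [List.map_cons, List.foldl_cons, pvBEncode_len]
    rw [ih]
    simp [pvMLen]

theorem pvBMaxAll (d : PySem.Dict String Int) (f : List (List (List (List String)))) (m : Int) :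
    (((f.map (pvPairEnc d)).flatten).flatten).foldl (fun m e => max m ((e.length : Int))) m
      = pvMLenAll m f := by
  induction f generalizing m with
  | nil => simp [pvMLenAll]
  | cons p ps ih =>
    simp only [List.map_cons, List.flatten_cons, pvPairEnc, List.flatten_append,
      List.foldl_append, List.flatten_nil, List.append_nil]
    rw [pvBMaxOb, pvBMaxOb, ih]
    simp [pvMLenAll, pvMLen, pvPairRes, List.foldl_append]

theorem pvBInit_eq : (pvBInitW2I, pvBInitI2W) = ((pvAInitW2I, pvAInitI2W) : PVVocab) := by decide

theorem pvBMaxTwo (d : PySem.Dict String Int) (f g : List (List (List (List String)))) :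
    (((f.map (pvPairEnc d) ++ g.map (pvPairEnc d)).flatten).flatten).foldl
        (fun m e => max m ((e.length : Int))) 0
      = pvMLenAll (pvMLenAll 0 f) g := by
  rw [List.flatten_append, List.flatten_append, List.foldl_append, pvBMaxAll, pvBMaxAll]

theorem pv_main (tr_f te_f : List (List (List (List String)))) (inc_test : Bool) :
    make_lang_structures tr_f te_f inc_test = make_lang_structures_alt tr_f te_f inc_test := by
  have h0i : PVExt pvAInitW2I ((pvAInitW2I, pvAInitI2W) : PVVocab).1 := pvExt_refl _
  cases inc_test with
  | false =>
    have h0V : PVExt pvAInitW2I ((pvBWords tr_f).foldl pvBAdd ((pvAInitW2I, pvAInitI2W) : PVVocab)).1 :=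
      pvFold_ext (pvBWords tr_f) (pvAInitW2I, pvAInitI2W)
    have htr := pvTrAll_eq tr_f ((pvAInitW2I, pvAInitI2W), 0)
      ((pvBWords tr_f).foldl pvBAdd (pvAInitW2I, pvAInitI2W)) h0i (pvExt_refl _)
    have hte := pvATeAll_false ((pvBWords tr_f).foldl pvBAdd (pvAInitW2I, pvAInitI2W))
      (pvMLenAll 0 tr_f) te_f h0V
    have hunk : ((pvBWords tr_f).foldl pvBAdd ((pvAInitW2I, pvAInitI2W) : PVVocab)).1.getD "<?>" 0 = 0 :=
      PySem.Dict.getD_of_get?_eq_some _ _ (h0V _ _ pvInit_q)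
    have hsi : ((pvBWords tr_f).foldl pvBAdd ((pvAInitW2I, pvAInitI2W) : PVVocab)).1.getD "<s>" 0 = 1 :=
      PySem.Dict.getD_of_get?_eq_some _ _ (h0V _ _ pvInit_s)
    have hei : ((pvBWords tr_f).foldl pvBAdd ((pvAInitW2I, pvAInitI2W) : PVVocab)).1.getD "<e>" 0 = 2 :=
      PySem.Dict.getD_of_get?_eq_some _ _ (h0V _ _ pvInit_e)
    simp only [make_lang_structures, make_lang_structures_alt, pvBVocab, pvBInit_eq,
      Bool.false_eq_true, if_false, List.append_nil, htr, hte, hunk, hsi, hei,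
      pvBEncFold_eq, pvBMaxTwo]
  | true =>
    have hsplit : (pvBWords tr_f ++ pvBWords te_f).foldl pvBAdd ((pvAInitW2I, pvAInitI2W) : PVVocab)
        = (pvBWords te_f).foldl pvBAdd ((pvBWords tr_f).foldl pvBAdd (pvAInitW2I, pvAInitI2W)) :=
      List.foldl_append
    have h0Vtr : PVExt pvAInitW2I ((pvBWords tr_f).foldl pvBAdd ((pvAInitW2I, pvAInitI2W) : PVVocab)).1 :=
      pvFold_ext (pvBWords tr_f) (pvAInitW2I, pvAInitI2W)
    have h0V : PVExt pvAInitW2I ((pvBWords tr_f ++ pvBWords te_f).foldl pvBAdd ((pvAInitW2I, pvAInitI2W) : PVVocab)).1 :=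
      pvFold_ext (pvBWords tr_f ++ pvBWords te_f) (pvAInitW2I, pvAInitI2W)
    have htr := pvTrAll_eq tr_f ((pvAInitW2I, pvAInitI2W), 0)
      ((pvBWords tr_f ++ pvBWords te_f).foldl pvBAdd (pvAInitW2I, pvAInitI2W)) h0i
      (by rw [hsplit]; exact pvFold_ext _ _)
    have hte0 := pvATeAll_true
      ((pvBWords tr_f).foldl pvBAdd (pvAInitW2I, pvAInitI2W), pvMLenAll 0 tr_f) te_f
    have hte1 := pvTrAll_eq te_f
      ((pvBWords tr_f).foldl pvBAdd (pvAInitW2I, pvAInitI2W), pvMLenAll 0 tr_f)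
      ((pvBWords tr_f ++ pvBWords te_f).foldl pvBAdd (pvAInitW2I, pvAInitI2W)) h0Vtr
      (by rw [hsplit]; exact pvExt_refl _)
    rw [hsplit] at hte1
    have hunk : ((pvBWords tr_f ++ pvBWords te_f).foldl pvBAdd ((pvAInitW2I, pvAInitI2W) : PVVocab)).1.getD "<?>" 0 = 0 :=
      PySem.Dict.getD_of_get?_eq_some _ _ (h0V _ _ pvInit_q)
    have hsi : ((pvBWords tr_f ++ pvBWords te_f).foldl pvBAdd ((pvAInitW2I, pvAInitI2W) : PVVocab)).1.getD "<s>" 0 = 1 :=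
      PySem.Dict.getD_of_get?_eq_some _ _ (h0V _ _ pvInit_s)
    have hei : ((pvBWords tr_f ++ pvBWords te_f).foldl pvBAdd ((pvAInitW2I, pvAInitI2W) : PVVocab)).1.getD "<e>" 0 = 2 :=
      PySem.Dict.getD_of_get?_eq_some _ _ (h0V _ _ pvInit_e)
    rw [hsplit] at hunk hsi hei
    simp only [make_lang_structures, make_lang_structures_alt, pvBVocab, pvBInit_eq,
      if_true, htr, hte0, hte1, hsplit, hunk, hsi, hei,
      pvBEncFold_eq, pvBMaxTwo]

-- ===== VERDICT (by name: the statement is the Claim_ definition above) =====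
theorem make_lang_structures_spec : Claim_equal_make_lang_structures := by
  intro tr_f te_f inc_test _hDom _hPre
  unfold Spec_make_lang_structures
  exact pv_main tr_f te_f inc_test
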